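-- pv_equiv track=rewrite | github.com/parlametria/revisao-temperatura | analises/utils.py | mass_replace
-- ===== SOURCE A (Python) =====
-- def mass_replace(string_list, orig, new):
--     """
--     For each string in `string_list`, replace each element in `orig`
--     by the corresponding element in `new`.
--
--     Input
--     -----
--
--     string_list : list of str
--         The strings in which the replace operation will be performed.
--
--     orig : str or list of str
--         The substring to be found and replaced in each string in `string_list`,
--         or a list of those.
--
--     new : str or list of str
--         The string that will replace `orig` in `string_list`, or
--         a list of those.
--
--     Return
--     ------
--
--     result : list of str
--         List with same length as `string_list`, with all pairs of patterns
--         in `zip(orig, new)` replaced, element-wise.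
--     """
--
--     # Standardize input to list of strings:
--     if type(orig) == str:
--         orig = [orig]
--     if type(new) == str:
--         new = [new]
--
--     # Make sure `orig` and `new` have the same length:
--     assert len(orig) == len(new), '`orig` and `new` should have the same length.'
--
--     result = string_list
--     for o, n in zip(orig, new):
--         result = [string.replace(o, n) for string in result]
--     return result
-- ===== SOURCE B (Python) =====
-- def mass_replace(string_list, orig, new):
--     # Standardize input to list of strings:
--     if type(orig) == str:
--         orig = [orig]
--     if type(new) == str:
--         new = [new]
--     assert len(orig) == len(new), '`orig` and `new` should have the same length.'
--     pairs = list(zip(orig, new))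
--     result = []
--     for string in string_list:
--         for o, n in pairs:
--             string = string.replace(o, n)
--         result.append(string)
--     return result
-- ===== Notes on version B (the rewrite author's own statement) =====
-- stated objective: alternative
-- what changed: B swaps the loop nesting: instead of one full list pass per (orig,new) pair building K intermediate lists, B traverses the list once and folds the replacement pairs through each string individually.
import Mathlib
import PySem

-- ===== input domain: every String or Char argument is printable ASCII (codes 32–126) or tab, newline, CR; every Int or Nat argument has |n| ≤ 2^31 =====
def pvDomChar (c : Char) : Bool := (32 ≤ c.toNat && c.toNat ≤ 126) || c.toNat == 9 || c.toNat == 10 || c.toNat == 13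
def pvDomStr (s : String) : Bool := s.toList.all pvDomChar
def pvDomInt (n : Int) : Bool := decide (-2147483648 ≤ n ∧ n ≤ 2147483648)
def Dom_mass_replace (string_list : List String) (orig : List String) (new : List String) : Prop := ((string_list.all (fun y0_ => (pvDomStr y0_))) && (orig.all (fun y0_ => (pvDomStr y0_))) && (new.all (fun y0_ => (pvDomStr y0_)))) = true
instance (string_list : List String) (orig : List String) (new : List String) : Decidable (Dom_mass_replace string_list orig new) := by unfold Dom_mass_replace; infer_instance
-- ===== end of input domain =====

-- B swaps the loop nesting of A: one pass over the list, folding all replacement pairs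
-- through each string (objective: alternative decomposition; return value proved equal).

-- ===== PORT A =====
-- A: for each (o, n) in zip(orig, new), rebuild the whole list by a comprehension.
def mass_replace (string_list : List String) (orig : List String) (new : List String) : List String :=
  (orig.zip new).foldl
    (fun result on => result.map (fun string => PySem.Str.replace string on.1 on.2))
    string_list

-- ===== PORT B =====
-- B: one pass over string_list; each string folds through all pairs.
def mass_replace_alt (string_list : List String) (orig : List String) (new : List String) : List String :=
  let pairs := orig.zip new
  string_list.foldr
    (fun string result =>
      (pairs.foldl (fun s on => PySem.Str.replace s on.1 on.2) string) :: result)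
    []

-- ===== PRECONDITION & SPEC =====
-- A asserts len(orig) == len(new) (AssertionError otherwise); those inputs are excluded.
def Pre_mass_replace (string_list : List String) (orig : List String) (new : List String) : Prop :=
  orig.length = new.length
instance (string_list : List String) (orig : List String) (new : List String) : Decidable (Pre_mass_replace string_list orig new) := by unfold Pre_mass_replace; infer_instance

def pvWitness_mass_replace : List String × List String × List String :=
  (["abc", "cab"], ["a", "b"], ["x", "y"])

def Spec_mass_replace (string_list : List String) (orig : List String) (new : List String) (out : List String) : Prop := out = mass_replace_alt string_list orig new
instance (string_list : List String) (orig : List String) (new : List String) (out : List String) : Decidable (Spec_mass_replace string_list orig new out) := by unfold Spec_mass_replace; infer_instance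

-- ===== CLAIM (what is proved, stated in full; the proofs are below) =====
def Claim_equal_mass_replace : Prop := ∀ (string_list : List String) (orig : List String) (new : List String), Dom_mass_replace string_list orig new → Pre_mass_replace string_list orig new → Spec_mass_replace string_list orig new (mass_replace string_list orig new)

-- ===== LEMMAS AND PROOFS =====

-- folding map-passes over a list = mapping the per-element fold
theorem foldl_map_comm {α β : Type} (ps : List β) (f : α → β → α) (xs : List α) :
    ps.foldl (fun r p => r.map (fun x => f x p)) xs
      = xs.map (fun x => ps.foldl f x) := by
  induction ps generalizing xs with
  | nil => simp
  | cons p ps ih =>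
      simp only [List.foldl_cons, ih, List.map_map]
      rfl

theorem foldr_cons_eq_map {α β : Type} (g : α → β) (xs : List α) :
    xs.foldr (fun x r => g x :: r) [] = xs.map g := by
  induction xs with
  | nil => rfl
  | cons x xs ih => simp [ih]

-- ===== VERDICT (by name: the statement is the Claim_ definition above) =====
theorem mass_replace_spec : Claim_equal_mass_replace := by
  intro string_list orig new _ _
  unfold Spec_mass_replace mass_replace mass_replace_alt
  rw [foldl_map_comm, foldr_cons_eq_map]
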